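-- pv_equiv track=rewrite | github.com/n7tms/AOC | AOC2017/06.py | part2
-- ===== SOURCE A (Python) =====
-- def part2(data,cnt, first):    # part1: 6681; part2: 2392
--     history = []
--
--     while history.count(data) < cnt:
--         x = data.copy()
--         history.append(x)
--         maxidx = data.index(max(data))
--         maxval = data[maxidx]
--         data[maxidx] = 0
--
--         for i in range(maxidx+1,maxidx+maxval+1):
--             data[i % len(data)] += 1
--
--     return len(history) - first
-- ===== SOURCE B (Python) =====
-- def part2(data, cnt, first):
--     # Hash-based cycle counting (a dict counter instead of list.count scans over
--     # the whole history), a single running-max scan instead of max()+index(), and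
--     # a closed-form divmod redistribution building a fresh state list each step.
--     # Does not mutate `data` in place (A does); equivalence is about the return value.
--     n = len(data)
--     seen = {}
--     steps = 0
--     state = list(data)
--     while seen.get(tuple(state), 0) < cnt:
--         key = tuple(state)
--         seen[key] = seen.get(key, 0) + 1
--         steps += 1
--         maxidx, maxval = 0, state[0]
--         for i, v in enumerate(state):
--             if v > maxval:
--                 maxidx, maxval = i, v
--         q, r = divmod(max(maxval, 0), n)
--         state = [(0 if j == maxidx else state[j]) + q +
--                  (1 if (j - maxidx - 1) % n < r else 0) for j in range(n)]
--     return steps - first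
-- ===== Notes on version B (the rewrite author's own statement) =====
-- stated objective: alternative
-- what changed: Cycle detection uses a dict counter keyed by the state tuple instead of scanning the whole history list with list.count each iteration, the first maximum is found by one running-max scan instead of max()+list.index(), and the redistribution is a closed-form divmod comprehension building a fresh list instead of maxval single-unit increments.
import Mathlib
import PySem

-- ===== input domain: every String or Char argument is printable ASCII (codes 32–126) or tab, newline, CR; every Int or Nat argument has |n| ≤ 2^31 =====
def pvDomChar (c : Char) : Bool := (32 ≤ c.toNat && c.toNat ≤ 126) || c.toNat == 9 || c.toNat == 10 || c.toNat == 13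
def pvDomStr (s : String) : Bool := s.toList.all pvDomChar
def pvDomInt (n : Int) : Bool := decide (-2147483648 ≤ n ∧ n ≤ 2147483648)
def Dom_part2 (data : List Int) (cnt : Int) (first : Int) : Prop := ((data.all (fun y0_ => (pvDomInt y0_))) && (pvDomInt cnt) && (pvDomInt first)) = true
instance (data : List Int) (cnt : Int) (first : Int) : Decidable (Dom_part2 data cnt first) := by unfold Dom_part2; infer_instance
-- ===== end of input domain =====

-- B replaces A's history-list counting by a dict counter, A's max()+list.index() by one
-- running-max scan, and A's per-unit redistribution loop by a closed-form divmod pass that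
-- builds a fresh state list (objective: alternative algorithm, similar measured cost).
-- A mutates `data` in place in Python, B does not; the equivalence proved is about the
-- return value. Both loops are ported with a large fuel bound (4294967296 outer iterations);
-- on fuel exhaustion both ports return the same expression.

-- ===== PORT A =====
-- while history.count(data) < cnt: …  (none = the ValueError of max([]) on empty data)
def part2LoopA (fuel : Nat) (history : List (List Int)) (data : List Int)
    (cnt first : Int) : Option Int :=
  match fuel with
  | 0 => some ((history.length : Int) - first)
  | fuel + 1 =>
    if ((PySem.List.count history data : Int)) < cnt then
      let history := history ++ [data]           -- x = data.copy(); history.append(x)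
      match PySem.List.max? data (fun y => y) with
      | none => none                             -- max([]) raises ValueError
      | some m =>
        match PySem.List.index? data m with
        | none => none                           -- unreachable: m ∈ data
        | some maxidx =>
          let maxval := m                        -- maxval = data[maxidx] (= the max m)
          let data := data.set maxidx 0          -- data[maxidx] = 0
          -- for i in range(maxidx+1, maxidx+maxval+1): data[i % len(data)] += 1
          let data :=
            (PySem.List.pyRange ((maxidx : Int) + 1) ((maxidx : Int) + maxval + 1) 1).foldl
              (fun d i =>
                let k := (PySem.Int.mod i (d.length : Int)).toNat  -- i % len(data): in range, so getD/set are exact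
                d.set k (d.getD k 0 + 1)) data
          part2LoopA fuel history data cnt first
    else some ((history.length : Int) - first)

def part2 (data : List Int) (cnt : Int) (first : Int) : Int :=
  (part2LoopA 4294967296 [] data cnt first).getD 0

-- ===== PORT B =====
-- while seen.get(key, 0) < cnt: dict counter, running-max scan, divmod list comprehension
def part2AltLoop (fuel : Nat) (seen : PySem.Dict (List Int) Int) (steps : Int)
    (state : List Int) (n : Nat) (cnt first : Int) : Option Int :=
  match fuel with
  | 0 => some (steps - first)
  | fuel + 1 =>
    if seen.getD state 0 < cnt then
      let seen := seen.insert state (seen.getD state 0 + 1)   -- seen[key] = seen.get(key, 0) + 1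
      let steps := steps + 1
      match state.head? with
      | none => none                             -- state[0] raises IndexError on empty state
      | some v0 =>
        -- for i, v in enumerate(state): if v > maxval: maxidx, maxval = i, v
        let p := (PySem.List.enumerate state 0).foldl
          (fun p e => if e.2 > p.2 then (e.1, e.2) else p) ((0 : Int), v0)
        match PySem.Int.divmod? (max p.2 0) (n : Int) with
        | none => none                           -- ZeroDivisionError (n = 0), unreachable here
        | some qr =>
          -- [(0 if j == maxidx else state[j]) + q + (1 if (j-maxidx-1) % n < r else 0) for j in range(n)]
          let state := (PySem.List.pyRange 0 (n : Int) 1).map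
            (fun j => (if j = p.1 then 0 else PySem.List.pyGetD state j 0) + qr.1 +
              (if PySem.Int.mod (j - p.1 - 1) (n : Int) < qr.2 then 1 else 0))
          part2AltLoop fuel seen steps state n cnt first
    else some (steps - first)

def part2_alt (data : List Int) (cnt : Int) (first : Int) : Int :=
  (part2AltLoop 4294967296 PySem.Dict.empty 0 data data.length cnt first).getD 0

-- ===== PRECONDITION & SPEC =====
-- Pre_ excludes only the inputs where the Pythons raise: data = [] with cnt > 0 makes
-- A raise ValueError (max([])) and B raise IndexError (state[0]).
def Pre_part2 (data : List Int) (cnt : Int) (first : Int) : Prop := 0 < cnt → data ≠ []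
instance (data : List Int) (cnt : Int) (first : Int) : Decidable (Pre_part2 data cnt first) := by unfold Pre_part2; infer_instance

def pvWitness_part2 : List Int × Int × Int := ([0, 2, 7, 0], 2, 1)

def Spec_part2 (data : List Int) (cnt : Int) (first : Int) (out : Int) : Prop := out = part2_alt data cnt first
instance (data : List Int) (cnt : Int) (first : Int) (out : Int) : Decidable (Spec_part2 data cnt first out) := by unfold Spec_part2; infer_instance

-- ===== CLAIM (what is proved, stated in full; the proofs are below) =====
def Claim_equal_part2 : Prop := ∀ (data : List Int) (cnt : Int) (first : Int), Dom_part2 data cnt first → Pre_part2 data cnt first → Spec_part2 data cnt first (part2 data cnt first)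

-- ===== LEMMAS AND PROOFS =====

-- counting hits of a wrapped range, one step: the arithmetic core of the equivalence
theorem hit_arith (n a m j : Int) (hn : 0 < n) (hj0 : 0 ≤ j) (hjn : j < n) (hm : 0 ≤ m) :
    m / n + (if (j - a) % n < m % n then 1 else 0) + (if j = (a + m) % n then 1 else 0)
      = (m + 1) / n + (if (j - a) % n < (m + 1) % n then 1 else 0) := by
  have hne : n ≠ 0 := by omega
  have hX0 : 0 ≤ (j - a) % n := Int.emod_nonneg _ hne
  have hXn : (j - a) % n < n := Int.emod_lt_of_pos _ hn
  have hY0 : 0 ≤ m % n := Int.emod_nonneg _ hne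
  have hYn : m % n < n := Int.emod_lt_of_pos _ hn
  have hm' : n * (m / n) + m % n = m := Int.ediv_add_emod m n
  have hjj : j % n = j := Int.emod_eq_of_lt hj0 hjn
  have hiff : (j = (a + m) % n) ↔ ((j - a) % n = m % n) := by
    constructor
    · intro h
      have h1 : j % n = (a + m) % n := by rw [hjj]; exact h
      have h2 : (j - (a + m)) % n = 0 := Int.emod_eq_emod_iff_emod_sub_eq_zero.mp h1
      have h3 : ((j - a) - m) % n = 0 := by rw [show j - a - m = j - (a + m) by ring]; exact h2
      exact Int.emod_eq_emod_iff_emod_sub_eq_zero.mpr h3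
    · intro h
      have h2 : ((j - a) - m) % n = 0 := Int.emod_eq_emod_iff_emod_sub_eq_zero.mp h
      have h1 : (j - (a + m)) % n = 0 := by rw [show j - (a + m) = j - a - m by ring]; exact h2
      have h4 := Int.emod_eq_emod_iff_emod_sub_eq_zero.mpr h1
      rw [hjj] at h4; exact h4
  have hsucc : m + 1 = (m % n + 1) + n * (m / n) := by linarith [hm']
  by_cases hcase : m % n + 1 < n
  · have hdiv : (m + 1) / n = m / n := by
      rw [hsucc, Int.add_mul_ediv_left _ _ hne,
        Int.ediv_eq_zero_of_lt (by linarith [hY0]) hcase]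
      ring
    have hmod : (m + 1) % n = m % n + 1 := by
      rw [hsucc, Int.add_mul_emod_self_left, Int.emod_eq_of_lt (by linarith [hY0]) hcase]
    rw [hdiv, hmod]
    by_cases hxy : (j - a) % n = m % n
    · rw [if_pos (hiff.mpr hxy), hxy, if_neg (lt_irrefl _), if_pos (by linarith)]; ring
    · rw [if_neg (fun h => hxy (hiff.mp h))]
      rcases lt_or_gt_of_ne hxy with hlt | hgt
      · rw [if_pos hlt, if_pos (by linarith)]; ring
      · rw [if_neg (by linarith), if_neg (by linarith)]; ring
  · have hYtop : m % n + 1 = n := by linarith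
    have hdiv : (m + 1) / n = m / n + 1 := by
      rw [hsucc, Int.add_mul_ediv_left _ _ hne, hYtop, Int.ediv_self hne]; ring
    have hmod : (m + 1) % n = 0 := by
      rw [hsucc, Int.add_mul_emod_self_left, hYtop, Int.emod_self]
    rw [hdiv, hmod]
    by_cases hxy : (j - a) % n = m % n
    · rw [if_pos (hiff.mpr hxy), hxy, if_neg (lt_irrefl _), if_neg (not_lt.mpr hY0)]; ring
    · rw [if_neg (fun h => hxy (hiff.mp h))]
      rcases lt_or_gt_of_ne hxy with hlt | hgt
      · rw [if_pos hlt, if_neg (not_lt.mpr hX0)]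
      · exfalso; linarith

-- A's inner loop, pointwise: fold of single increments over range(a, a+m)
-- adds m/n to every cell and one extra to the r = m % n cells after position a.
theorem foldA_pointwise (base : List Int) (a : Int) (m : Nat) (hn : 0 < base.length) :
    ((PySem.List.pyRange a (a + m) 1).foldl
        (fun d i =>
          let k := (PySem.Int.mod i (d.length : Int)).toNat
          d.set k (d.getD k 0 + 1)) base).length = base.length ∧
    ∀ j : Nat, j < base.length →
      ((PySem.List.pyRange a (a + m) 1).foldl
          (fun d i =>
            let k := (PySem.Int.mod i (d.length : Int)).toNat
            d.set k (d.getD k 0 + 1)) base).getD j 0 =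
        base.getD j 0 + (m : Int) / (base.length : Int) +
          (if ((j : Int) - a) % (base.length : Int) < (m : Int) % (base.length : Int)
            then 1 else 0) := by
  have hnpos : (0 : Int) < (base.length : Int) := by exact_mod_cast hn
  have hne : (base.length : Int) ≠ 0 := by omega
  induction m with
  | zero =>
    rw [show a + ((0 : Nat) : Int) = a by simp, PySem.List.pyRange_one_eq_nil (le_refl a),
      List.foldl_nil]
    refine ⟨rfl, fun j hj => ?_⟩
    rw [show (((0 : Nat) : Int)) = 0 from rfl, Int.zero_ediv, Int.zero_emod,
      if_neg (fun h => absurd h (not_lt.mpr (Int.emod_nonneg _ hne)))]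
    ring
  | succ m ih =>
    obtain ⟨ihlen, ihget⟩ := ih
    have hsplit : PySem.List.pyRange a (a + ((m + 1 : Nat) : Int)) 1
        = PySem.List.pyRange a (a + (m : Nat)) 1 ++ [a + (m : Nat)] := by
      rw [show a + ((m + 1 : Nat) : Int) = (a + (m : Nat)) + 1 by push_cast; ring]
      exact PySem.List.pyRange_one_succ_right (by omega)
    rw [hsplit, List.foldl_append]
    set prev := (PySem.List.pyRange a (a + (m : Nat)) 1).foldl
        (fun d i =>
          let k := (PySem.Int.mod i (d.length : Int)).toNat
          d.set k (d.getD k 0 + 1)) base with hprev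
    simp only [List.foldl_cons, List.foldl_nil]
    have hk0 : 0 ≤ (a + (m : Nat)) % (base.length : Int) := Int.emod_nonneg _ hne
    have hkn : (a + (m : Nat)) % (base.length : Int) < (base.length : Int) :=
      Int.emod_lt_of_pos _ hnpos
    have hmodk : PySem.Int.mod (a + (m : Nat)) ((prev.length : Int))
        = (a + (m : Nat)) % (base.length : Int) := by
      rw [ihlen, PySem.Int.mod_eq_emod_of_pos hnpos]
    rw [hmodk]
    set K := ((a + (m : Nat)) % (base.length : Int)).toNat with hKdef
    have hKI : (K : Int) = (a + (m : Nat)) % (base.length : Int) := Int.toNat_of_nonneg hk0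
    have hKlt : K < base.length := by
      have : (K : Int) < (base.length : Int) := by rw [hKI]; exact hkn
      exact_mod_cast this
    constructor
    · rw [List.length_set, ihlen]
    · intro j hj
      have hjprev : j < prev.length := by rw [ihlen]; exact hj
      have hjset : j < (prev.set K (prev.getD K 0 + 1)).length := by
        rw [List.length_set]; exact hjprev
      have harith := hit_arith (base.length : Int) a (m : Int) (j : Int) hnpos
        (by omega) (by exact_mod_cast hj) (by omega)
      rw [List.getD_eq_getElem _ _ hjset, List.getElem_set]
      push_cast
      by_cases hjk : K = j
      · rw [if_pos hjk]
        have hKprev : prev.getD K 0 = base.getD K 0 + (m : Int) / (base.length : Int) +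
            (if ((K : Int) - a) % (base.length : Int) < (m : Int) % (base.length : Int)
              then 1 else 0) := ihget K hKlt
        rw [hKprev, hjk]
        have hjeq : (j : Int) = (a + (m : Nat)) % (base.length : Int) := by
          rw [← hKI, hjk]
        rw [if_pos hjeq] at harith
        push_cast at harith
        linarith
      · rw [if_neg hjk, ← List.getD_eq_getElem _ _ hjprev, ihget j hj]
        have hjne : ¬ ((j : Int) = (a + (m : Nat)) % (base.length : Int)) := by
          intro h
          exact hjk (by exact_mod_cast hKI.trans h.symm)
        rw [if_neg hjne] at harith
        push_cast at harith
        linarith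

-- two Int lists agree if they have the same length and the same getD at every index
theorem getD_ext (l1 l2 : List Int) (hlen : l1.length = l2.length)
    (h : ∀ j : Nat, j < l1.length → l1.getD j 0 = l2.getD j 0) : l1 = l2 := by
  apply List.ext_getElem hlen
  intro j h1 h2
  have h3 := h j h1
  rwa [List.getD_eq_getElem _ _ h1, List.getD_eq_getElem _ _ h2] at h3

-- B's comprehension over range(n), pointwise
theorem mapB_pointwise (f : Int → Int) (n : Nat) :
    ((PySem.List.pyRange 0 (n : Int) 1).map f).length = n ∧
    ∀ j : Nat, j < n → ((PySem.List.pyRange 0 (n : Int) 1).map f).getD j 0 = f (j : Int) := by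
  have hlen : ((PySem.List.pyRange 0 (n : Int) 1).map f).length = n := by
    rw [List.length_map, PySem.List.length_pyRange_one]; omega
  refine ⟨hlen, fun j hj => ?_⟩
  have hj' : j < ((PySem.List.pyRange 0 (n : Int) 1).map f).length := by omega
  rw [List.getD_eq_getElem _ _ hj', List.getElem_map, PySem.List.getElem_pyRange_one]
  norm_num

-- the running-max scan over enumerate t s: if the tail raises the max, the first index
-- where it does is the first occurrence of the max; otherwise the accumulator survives.
theorem scan_spec (t : List Int) : ∀ (s bi bv : Int),
    (t.foldl max bv > bv →
      ∃ k : Nat, PySem.List.index? t (t.foldl max bv) = some k ∧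
        (PySem.List.enumerate t s).foldl
            (fun p e => if e.2 > p.2 then (e.1, e.2) else p) (bi, bv)
          = (s + (k : Int), t.foldl max bv)) ∧
    (¬ t.foldl max bv > bv →
      (PySem.List.enumerate t s).foldl
          (fun p e => if e.2 > p.2 then (e.1, e.2) else p) (bi, bv) = (bi, bv)) := by
  induction t with
  | nil =>
    intro s bi bv
    exact ⟨fun h => absurd h (lt_irrefl bv), fun _ => rfl⟩
  | cons a t ih =>
    intro s bi bv
    rw [PySem.List.enumerate_cons, List.foldl_cons]
    by_cases ha : a > bv
    · have hmax : max bv a = a := max_eq_right (le_of_lt ha)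
      simp only [List.foldl_cons, if_pos ha, hmax]
      have hle : a ≤ t.foldl max a := (PySem.List.le_foldl_max t a).1
      by_cases h' : t.foldl max a > a
      · obtain ⟨k, hk, hsc⟩ := (ih (s + 1) s a).1 h'
        have hne : a ≠ t.foldl max a := by omega
        refine ⟨fun _ => ⟨k + 1, ?_, ?_⟩, fun h => absurd (by omega) h⟩
        · rw [PySem.List.index?_cons_of_ne t hne, hk]; rfl
        · rw [hsc]; congr 1; push_cast; ring
      · have heq : t.foldl max a = a := by omega
        have hsc := (ih (s + 1) s a).2 h'
        rw [heq]
        refine ⟨fun _ => ⟨0, ?_, ?_⟩, fun h => absurd ha h⟩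
        · exact PySem.List.index?_cons_self a t
        · rw [hsc]; norm_num
    · have hmax : max bv a = bv := max_eq_left (by omega)
      simp only [List.foldl_cons, if_neg ha, hmax]
      by_cases h' : t.foldl max bv > bv
      · obtain ⟨k, hk, hsc⟩ := (ih (s + 1) bi bv).1 h'
        have hne : a ≠ t.foldl max bv := by omega
        refine ⟨fun _ => ⟨k + 1, ?_, ?_⟩, fun h => absurd h' h⟩
        · rw [PySem.List.index?_cons_of_ne t hne, hk]; rfl
        · rw [hsc]; congr 1; push_cast; ring
      · exact ⟨fun h => absurd h h', fun _ => (ih (s + 1) bi bv).2 h'⟩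

-- B's scan on a nonempty list yields exactly (first index of the max, the max)
theorem scan_top (x : Int) (t : List Int) :
    ∃ k : Nat, PySem.List.index? (x :: t) (t.foldl max x) = some k ∧
      (PySem.List.enumerate (x :: t) 0).foldl
          (fun p e => if e.2 > p.2 then (e.1, e.2) else p) ((0 : Int), x)
        = ((k : Int), t.foldl max x) := by
  rw [PySem.List.enumerate_cons, List.foldl_cons, if_neg (lt_irrefl x)]
  have hle : x ≤ t.foldl max x := (PySem.List.le_foldl_max t x).1
  by_cases h' : t.foldl max x > x
  · obtain ⟨k, hk, hsc⟩ := (scan_spec t (0 + 1) 0 x).1 h'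
    have hne : x ≠ t.foldl max x := by omega
    refine ⟨k + 1, ?_, ?_⟩
    · rw [PySem.List.index?_cons_of_ne t hne, hk]; rfl
    · rw [hsc]; congr 1; push_cast; ring
  · have heq : t.foldl max x = x := by omega
    have hsc := (scan_spec t (0 + 1) 0 x).2 h'
    rw [heq]
    exact ⟨0, PySem.List.index?_cons_self x t, by rw [hsc]; norm_num⟩

-- A's wrapped range equals its truncated-length form (empty when maxval ≤ 0)
theorem rangeA_eq (a m : Int) :
    PySem.List.pyRange a (a + m + 1 - 1) 1 = PySem.List.pyRange a (a + (m.toNat : Int)) 1 := by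
  by_cases hm : 0 ≤ m
  · rw [show a + m + 1 - 1 = a + m by ring, Int.toNat_of_nonneg hm]
  · rw [show a + m + 1 - 1 = a + m by ring, PySem.List.pyRange_one_eq_nil (by omega),
      PySem.List.pyRange_one_eq_nil (by omega)]

-- the redistribution step: A's fold of single increments = B's divmod comprehension
theorem step_eq (data : List Int) (m : Int) (k : Nat) (hk : k < data.length) :
    ((PySem.List.pyRange ((k : Int) + 1) ((k : Int) + m + 1) 1).foldl
        (fun d i =>
          let j := (PySem.Int.mod i (d.length : Int)).toNat
          d.set j (d.getD j 0 + 1)) (data.set k 0))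
      = (PySem.List.pyRange 0 ((data.length : Int)) 1).map
          (fun j => (if j = (k : Int) then 0 else PySem.List.pyGetD data j 0)
            + PySem.Int.floordiv (max m 0) (data.length : Int)
            + (if PySem.Int.mod (j - (k : Int) - 1) (data.length : Int)
                < PySem.Int.mod (max m 0) (data.length : Int) then 1 else 0)) := by
  set base := data.set k 0 with hbase
  have hblen : base.length = data.length := List.length_set
  have hn : 0 < base.length := by omega
  have hnpos : (0 : Int) < (data.length : Int) := by exact_mod_cast (by omega : 0 < data.length)
  have hrange : PySem.List.pyRange ((k : Int) + 1) ((k : Int) + m + 1) 1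
      = PySem.List.pyRange ((k : Int) + 1) (((k : Int) + 1) + (m.toNat : Int)) 1 := by
    have := rangeA_eq ((k : Int) + 1) m
    rw [show (k : Int) + 1 + m + 1 - 1 = (k : Int) + m + 1 by ring] at this
    exact this
  rw [hrange]
  obtain ⟨hAlen, hAget⟩ := foldA_pointwise base ((k : Int) + 1) m.toNat hn
  obtain ⟨hBlen, hBget⟩ := mapB_pointwise
    (fun j => (if j = (k : Int) then 0 else PySem.List.pyGetD data j 0)
      + PySem.Int.floordiv (max m 0) (data.length : Int)
      + (if PySem.Int.mod (j - (k : Int) - 1) (data.length : Int)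
          < PySem.Int.mod (max m 0) (data.length : Int) then 1 else 0)) data.length
  apply getD_ext _ _ (by rw [hAlen, hBlen, hblen])
  intro j hj
  have hjd : j < data.length := by omega
  rw [hAget j (by omega), hBget j hjd]
  have hmt : ((m.toNat : Nat) : Int) = max m 0 := by omega
  have hbj : base.getD j 0 = if (j : Int) = (k : Int) then 0 else PySem.List.pyGetD data j 0 := by
    rw [hbase, List.getD_eq_getElem _ _ (by simpa using hjd), List.getElem_set]
    by_cases hjk : k = j
    · rw [if_pos hjk, if_pos (by exact_mod_cast hjk.symm)]
    · rw [if_neg hjk, if_neg (by exact_mod_cast fun h => hjk (by exact_mod_cast h.symm)),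
        PySem.List.pyGetD_natCast, List.getD_eq_getElem _ _ hjd]
  rw [hbj, hblen, hmt, PySem.Int.floordiv_eq_ediv_of_pos hnpos,
    PySem.Int.mod_eq_emod_of_pos hnpos, PySem.Int.mod_eq_emod_of_pos hnpos,
    show (j : Int) - ((k : Int) + 1) = (j : Int) - (k : Int) - 1 by ring]

-- the two loops agree: steps counts the history, the dict counts each state's occurrences
theorem loop_eq (cnt first : Int) :
    ∀ (fuel : Nat) (history : List (List Int)) (seen : PySem.Dict (List Int) Int)
      (steps : Int) (data : List Int),
      (∀ s, seen.getD s 0 = ((PySem.List.count history s : Nat) : Int)) →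
      steps = (history.length : Int) →
      part2LoopA fuel history data cnt first
        = part2AltLoop fuel seen steps data data.length cnt first := by
  intro fuel
  induction fuel with
  | zero => intro history seen steps data _ hsteps; simp [part2LoopA, part2AltLoop, hsteps]
  | succ fuel ih =>
    intro history seen steps data hseen hsteps
    rw [part2LoopA, part2AltLoop, hseen data]
    by_cases hcnt : (((PySem.List.count history data : Nat) : Int)) < cnt
    · rw [if_pos hcnt, if_pos hcnt]
      have hseen' : ∀ s, (seen.insert data (seen.getD data 0 + 1)).getD s 0
          = ((PySem.List.count (history ++ [data]) s : Nat) : Int) := by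
        intro s
        rw [PySem.Dict.getD_insert, hseen data, hseen s]
        by_cases hsd : s = data
        · subst hsd
          simp [PySem.List.count_eq, List.count_append]
        · rw [if_neg hsd]
          simp [PySem.List.count_eq, List.count_append, Ne.symm hsd]
      have hsteps' : steps + 1 = (((history ++ [data]).length : Nat) : Int) := by
        simp only [List.length_append, List.length_singleton]
        push_cast
        omega
      cases data with
      | nil =>
        rfl
      | cons x t =>
        obtain ⟨k, hk, hsc⟩ := scan_top x t
        obtain ⟨hklt, -, -⟩ := PySem.List.getElem_of_index?_eq_some hk
        have hne : (((x :: t).length : Nat) : Int) ≠ 0 := by push_cast; omega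
        have hdm : PySem.Int.divmod? (max (t.foldl max x) 0) (((x :: t).length : Nat) : Int)
            = some (PySem.Int.floordiv (max (t.foldl max x) 0) (((x :: t).length : Nat) : Int),
                PySem.Int.mod (max (t.foldl max x) 0) (((x :: t).length : Nat) : Int)) := by
          simp only [PySem.Int.divmod?, if_neg hne]
          rfl
        have hstep := step_eq (x :: t) (t.foldl max x) k hklt
        obtain ⟨hBlen, -⟩ := mapB_pointwise
          (fun j => (if j = (k : Int) then 0 else PySem.List.pyGetD (x :: t) j 0)
            + PySem.Int.floordiv (max (t.foldl max x) 0) (((x :: t).length : Nat) : Int)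
            + (if PySem.Int.mod (j - (k : Int) - 1) (((x :: t).length : Nat) : Int)
                < PySem.Int.mod (max (t.foldl max x) 0) (((x :: t).length : Nat) : Int)
              then 1 else 0)) (x :: t).length
        simp only [PySem.List.max?_id_cons, hk, List.head?_cons, hsc, hdm, hstep]
        rw [ih (history ++ [x :: t]) (seen.insert (x :: t) (seen.getD (x :: t) 0 + 1))
          (steps + 1) _ hseen' hsteps', hBlen, hseen (x :: t)]
    · rw [if_neg hcnt, if_neg hcnt, hsteps]

-- ===== VERDICT (by name: the statement is the Claim_ definition above) =====
theorem part2_spec : Claim_equal_part2 := by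
  intro data cnt first _ _
  unfold Spec_part2 part2 part2_alt
  rw [loop_eq cnt first 4294967296 [] PySem.Dict.empty 0 data
    (fun s => by rw [PySem.Dict.getD_empty]; simp) rfl]
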